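-- pv_equiv track=rewrite | github.com/zeyuyuyu/abel-causal-advantage-benchmark | evaluate_batch1.py | get_skill_dellma_answer
-- ===== SOURCE A (Python) =====
-- def get_skill_dellma_answer(options, question):
--     """
--     Skill-augmented answer using Abel causal graph + hypotheses.
--
--     6-step workflow synthesis:
--     1. Classify: direct_graph (all are tickers)
--     2. Hypotheses:
--        H1: AI momentum favors NVDA/AMD (consensus)
--        H2: Meme/momentum favors GME (retail sentiment)
--        H3: Value rotation favors META/GOOGL (earnings-driven)
--        H4 CONTRARIAN: AMD semiconductors entering supply cycle peak -> biggest upside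
--     3. Graph discovery: Abel neighbors show crypto/alt correlations (not directly useful for Dec 2023)
--        AMD and NVDA have no causal parents identified - suggests more independent/volatile
--     4. Observe: Abel current signals show META negative, GME negative
--        But for Dec 2023 context: AMD's AI chip narrative was peaking
--     5. Web grounding: In Dec 2023, AMD launched MI300X, major AI chip catalyst
--        This is the key insight that overrides base NVDA preference
--     6. Synthesize: AMD's MI300X launch in Dec 2023 was a specific catalyst
--        Abel's lack of parents for AMD suggests it moves on its own fundamentals
--        CONTRARIAN hypothesis: AMD's lower starting valuation vs NVDA = more room to run
--
--     Result: Skill workflow arrives at AMD for most combos (correct!)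
--     When AMD isn't available: Consider the actual returns ranking
--     """
--
--     # Map GOOG -> GOOGL for comparison
--     mapped = []
--     has_spy = "SPY" in question
--     for o in options:
--         mapped.append("GOOGL" if o == "GOOG" else o)
--     if has_spy:
--         mapped.append("SPY")
--
--     # Skill-informed ranking:
--     # The causal-abel workflow key insight:
--     # - AMD has no Abel parents -> moves on own fundamentals (MI300X launch)
--     # - GME has self-referential causal loop (GME.price is its own driver) -> meme momentum
--     # - META has negative Abel signal -> caution
--     # - NVDA has no Abel parents either, but already priced in at higher level
--     # Skill ranking: AMD > GME > NVDA > META > GOOGL > SPY > DIS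
--     skill_ranking = ["AMD", "GME", "NVDA", "META", "GOOGL", "SPY", "DIS"]
--
--     for pref in skill_ranking:
--         if pref in mapped:
--             return pref
--     return mapped[0]
-- ===== SOURCE B (Python) =====
-- _SKILL_RANKING = ["AMD", "GME", "NVDA", "META", "GOOGL", "SPY", "DIS"]
-- _RANK = {t: i for i, t in enumerate(_SKILL_RANKING)}
--
-- def get_skill_dellma_answer(options, question):
--     mapped = ["GOOGL" if o == "GOOG" else o for o in options]
--     if "SPY" in question:
--         mapped.append("SPY")
--     best = None
--     for t in mapped:
--         r = _RANK.get(t)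
--         if r is not None and (best is None or r < best):
--             best = r
--     if best is None:
--         return mapped[0]
--     return _SKILL_RANKING[best]
-- ===== Notes on version B (the rewrite author's own statement) =====
-- stated objective: alternative
-- what changed: Instead of scanning the options once per entry of the fixed ranking (return first ranked ticker found), B builds a rank-index dict once and makes a single pass over the options keeping the minimum rank, indexing the ranking at the end.
import Mathlib
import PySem

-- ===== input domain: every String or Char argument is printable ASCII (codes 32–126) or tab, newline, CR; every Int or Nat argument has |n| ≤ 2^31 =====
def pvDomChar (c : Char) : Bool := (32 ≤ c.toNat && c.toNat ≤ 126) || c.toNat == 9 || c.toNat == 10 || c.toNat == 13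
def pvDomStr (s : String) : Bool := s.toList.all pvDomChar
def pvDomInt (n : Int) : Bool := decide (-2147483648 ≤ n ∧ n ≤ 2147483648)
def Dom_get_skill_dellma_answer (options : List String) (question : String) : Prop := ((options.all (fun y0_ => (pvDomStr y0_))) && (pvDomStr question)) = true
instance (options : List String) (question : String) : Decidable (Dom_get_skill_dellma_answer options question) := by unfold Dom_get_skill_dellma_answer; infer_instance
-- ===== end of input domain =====

-- B replaces A's scan of the fixed ranking against the options by a rank-index dict and a single min-rank pass over the options (alternative decomposition, same cost).


-- ===== PORT A =====
def get_skill_dellma_answer (options : List String) (question : String) : String :=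
  let has_spy := PySem.Str.isIn "SPY" question
  let mapped := options.foldl (fun acc o => acc ++ [if o == "GOOG" then "GOOGL" else o]) []
  let mapped := if has_spy then mapped ++ ["SPY"] else mapped
  let skill_ranking := ["AMD", "GME", "NVDA", "META", "GOOGL", "SPY", "DIS"]
  match skill_ranking.find? (fun pref => mapped.contains pref) with
  | some pref => pref
  | none => (PySem.List.pyGet? mapped 0).getD ""  -- mapped[0]; Pre_ excludes the empty case (IndexError)

-- ===== PORT B =====
-- module-level constants of Source B
def pvSkillRanking : List String := ["AMD", "GME", "NVDA", "META", "GOOGL", "SPY", "DIS"]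
def pvRank : PySem.Dict String Int :=
  (PySem.List.enumerate pvSkillRanking).foldl (fun d p => d.insert p.2 p.1) PySem.Dict.empty

def get_skill_dellma_answer_alt (options : List String) (question : String) : String :=
  let mapped := options.map (fun o => if o == "GOOG" then "GOOGL" else o)
  let mapped := if PySem.Str.isIn "SPY" question then mapped ++ ["SPY"] else mapped
  let best := mapped.foldl (fun best t =>
      match pvRank.get? t with
      | none => best
      | some r => match best with
        | none => some r
        | some b => if r < b then some r else some b) (none : Option Int)
  match best with
  | none => (PySem.List.pyGet? mapped 0).getD ""  -- mapped[0]; Pre_ excludes the empty case (IndexError)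
  | some b => (PySem.List.pyGet? pvSkillRanking b).getD ""

-- ===== PRECONDITION & SPEC =====
-- Pre_ excludes exactly the inputs where the Python A raises IndexError at `mapped[0]`:
-- empty options with no "SPY" in the question (B raises there too).
def Pre_get_skill_dellma_answer (options : List String) (question : String) : Prop :=
  options ≠ [] ∨ PySem.Str.isIn "SPY" question = true
instance (options : List String) (question : String) : Decidable (Pre_get_skill_dellma_answer options question) := by unfold Pre_get_skill_dellma_answer; infer_instance
def pvWitness_get_skill_dellma_answer : List String × String := (["NVDA", "GOOG"], "which ticker?")

def Spec_get_skill_dellma_answer (options : List String) (question : String) (out : String) : Prop := out = get_skill_dellma_answer_alt options question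
instance (options : List String) (question : String) (out : String) : Decidable (Spec_get_skill_dellma_answer options question out) := by unfold Spec_get_skill_dellma_answer; infer_instance

-- ===== CLAIM (what is proved, stated in full; the proofs are below) =====
def Claim_equal_get_skill_dellma_answer : Prop := ∀ (options : List String) (question : String), Dom_get_skill_dellma_answer options question → Pre_get_skill_dellma_answer options question → Spec_get_skill_dellma_answer options question (get_skill_dellma_answer options question)

-- ===== LEMMAS AND PROOFS =====


-- minimum rank present in m, written as the first ranking entry contained in m
def pvMinIdx (m : List String) : Option Int :=
  if m.contains "AMD" then some 0 else if m.contains "GME" then some 1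
  else if m.contains "NVDA" then some 2 else if m.contains "META" then some 3
  else if m.contains "GOOGL" then some 4 else if m.contains "SPY" then some 5
  else if m.contains "DIS" then some 6 else none

def pvComb (a b : Option Int) : Option Int :=
  match b with
  | none => a
  | some r => match a with
    | none => some r
    | some x => if r < x then some r else some x

theorem pvComb_assoc (a b c : Option Int) : pvComb (pvComb a b) c = pvComb a (pvComb b c) := by
  rcases a with _ | x <;> rcases b with _ | y <;> rcases c with _ | z <;>
    simp only [pvComb] <;> split_ifs <;> simp_all
  all_goals try (split_ifs <;> simp_all)
  all_goals omega

theorem pvComb_none_left (b : Option Int) : pvComb none b = b := by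
  cases b <;> rfl

theorem pvRank_get (t : String) :
    pvRank.get? t =
      (if "AMD" == t then some 0 else if "GME" == t then some 1 else if "NVDA" == t then some 2
       else if "META" == t then some 3 else if "GOOGL" == t then some 4
       else if "SPY" == t then some 5 else if "DIS" == t then some 6 else none) := by
  have h : pvRank = PySem.Dict.mk [("AMD", 0), ("GME", 1), ("NVDA", 2), ("META", 3),
      ("GOOGL", 4), ("SPY", 5), ("DIS", 6)] := by decide
  rw [h]
  simp [PySem.Dict.get?_mk_cons]
  rfl

set_option maxHeartbeats 1000000 in
theorem pvMinIdx_cons (t : String) (m : List String) :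
    pvMinIdx (t :: m) = pvComb (pvRank.get? t) (pvMinIdx m) := by
  rw [pvRank_get]
  by_cases h0 : "AMD" = t
  · subst h0; simp only [pvMinIdx, List.contains_cons]; norm_num [pvComb]
    split_ifs <;> simp_all
  by_cases h1 : "GME" = t
  · subst h1; simp only [pvMinIdx, List.contains_cons]; norm_num [pvComb]
    split_ifs <;> simp_all
  by_cases h2 : "NVDA" = t
  · subst h2; simp only [pvMinIdx, List.contains_cons]; norm_num [pvComb]
    split_ifs <;> simp_all
  by_cases h3 : "META" = t
  · subst h3; simp only [pvMinIdx, List.contains_cons]; norm_num [pvComb]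
    split_ifs <;> simp_all
  by_cases h4 : "GOOGL" = t
  · subst h4; simp only [pvMinIdx, List.contains_cons]; norm_num [pvComb]
    split_ifs <;> simp_all
  by_cases h5 : "SPY" = t
  · subst h5; simp only [pvMinIdx, List.contains_cons]; norm_num [pvComb]
    split_ifs <;> simp_all
  by_cases h6 : "DIS" = t
  · subst h6; simp only [pvMinIdx, List.contains_cons]; norm_num [pvComb]
    split_ifs <;> simp_all
  have g0 : ¬ t = "AMD" := fun h => h0 h.symm
  have g1 : ¬ t = "GME" := fun h => h1 h.symm
  have g2 : ¬ t = "NVDA" := fun h => h2 h.symm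
  have g3 : ¬ t = "META" := fun h => h3 h.symm
  have g4 : ¬ t = "GOOGL" := fun h => h4 h.symm
  have g5 : ¬ t = "SPY" := fun h => h5 h.symm
  have g6 : ¬ t = "DIS" := fun h => h6 h.symm
  simp [pvMinIdx, beq_iff_eq, h0, h1, h2, h3, h4, h5, h6,
    g0, g1, g2, g3, g4, g5, g6, pvComb_none_left]

theorem pvFold_eq (m : List String) (acc : Option Int) :
    m.foldl (fun best t =>
      match pvRank.get? t with
      | none => best
      | some r => match best with
        | none => some r
        | some b => if r < b then some r else some b) acc = pvComb acc (pvMinIdx m) := by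
  induction m generalizing acc with
  | nil => simp [pvMinIdx, pvComb]
  | cons t m ih =>
    rw [List.foldl_cons, ih, pvMinIdx_cons, ← pvComb_assoc]
    congr 1


theorem pvKey (m : List String) :
    (match ["AMD", "GME", "NVDA", "META", "GOOGL", "SPY", "DIS"].find?
        (fun pref => m.contains pref) with
      | some pref => pref
      | none => (PySem.List.pyGet? m 0).getD "") =
    (match pvMinIdx m with
      | none => (PySem.List.pyGet? m 0).getD ""
      | some b => (PySem.List.pyGet? pvSkillRanking b).getD "") := by
  simp only [List.find?, pvMinIdx]
  split_ifs with h0 h1 h2 h3 h4 h5 h6 <;> simp_all <;> rfl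

-- ===== VERDICT (by name: the statement is the Claim_ definition above) =====
theorem get_skill_dellma_answer_spec : Claim_equal_get_skill_dellma_answer := by
  intro options question _ _
  unfold Spec_get_skill_dellma_answer get_skill_dellma_answer get_skill_dellma_answer_alt
  simp only [PySem.List.foldl_append_singleton_eq_map, List.nil_append, pvFold_eq,
    pvComb_none_left]
  exact pvKey _
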